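-- pv_equiv track=rewrite | github.com/RooGonz/TP_Python | funcionesVACIAS.py | sacadorbarra
-- ===== SOURCE A (Python) =====
-- def sacadorbarra (cadena):
--     cadenaNva=""
--     for i in range(len(cadena)):
--         if i == len(cadena)-1:
--             cadenaNva+=","
--         else:
--             cadenaNva+=cadena[i]
--     return cadenaNva
-- ===== SOURCE B (Python) =====
-- def sacadorbarra(cadena):
--     return cadena[:-1] + "," if cadena else ""
-- ===== Notes on version B (the rewrite author's own statement) =====
-- stated objective: simpler
-- what changed: Replaced the index loop that copies characters one by one with a single slice-and-append expression (all-but-last character plus a trailing comma; empty string stays empty, as in A).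
import Mathlib
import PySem

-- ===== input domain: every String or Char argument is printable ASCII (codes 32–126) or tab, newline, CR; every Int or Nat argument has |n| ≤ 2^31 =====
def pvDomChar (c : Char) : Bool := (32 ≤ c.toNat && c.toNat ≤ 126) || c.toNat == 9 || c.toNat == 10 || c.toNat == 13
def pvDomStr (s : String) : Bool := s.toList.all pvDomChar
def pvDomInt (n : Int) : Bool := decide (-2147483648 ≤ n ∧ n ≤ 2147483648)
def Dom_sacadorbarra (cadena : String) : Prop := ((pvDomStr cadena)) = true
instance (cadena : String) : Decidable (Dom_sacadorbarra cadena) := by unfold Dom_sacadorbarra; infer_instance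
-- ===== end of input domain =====

-- B replaces A's character-by-character index loop with the single slice expression
-- cadena[:-1] + "," (empty input stays empty, as in A); objective: simpler.

-- ===== PORT A =====
-- literal port of A: build cadenaNva by iterating i over range(len(cadena)),
-- appending ',' at the last index and cadena[i] otherwise
def sacadorbarra (cadena : String) : String :=
  let cs := cadena.toList
  let res := (PySem.List.pyRange 0 (PySem.List.len cs) 1).foldl
    (fun (acc : List Char) i =>
      if i == PySem.List.len cs - 1 then acc ++ [',']
      else acc ++ (PySem.List.pyGet? cs i).toList) []
  String.ofList res

-- ===== PORT B =====
-- literal port of B: cadena[:-1] + "," if cadena else ""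
def sacadorbarra_alt (cadena : String) : String :=
  if cadena.toList.isEmpty then ""
  else String.ofList (PySem.List.slice cadena.toList none (some (-1)) ++ [','])

-- ===== PRECONDITION & SPEC =====
def Spec_sacadorbarra (cadena : String) (out : String) : Prop := out = sacadorbarra_alt cadena
instance (cadena : String) (out : String) : Decidable (Spec_sacadorbarra cadena out) := by unfold Spec_sacadorbarra; infer_instance

-- ===== CLAIM (what is proved, stated in full; the proofs are below) =====
def Claim_equal_sacadorbarra : Prop := ∀ (cadena : String), Dom_sacadorbarra cadena → Spec_sacadorbarra cadena (sacadorbarra cadena)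

-- ===== LEMMAS AND PROOFS =====

-- A's loop before the last index just copies characters: fold over range m is take m
lemma sac_loop_copy (cs : List Char) (m : Nat) (hm : m < cs.length) (acc : List Char) :
    (List.range m).foldl
      (fun (acc : List Char) (k : Nat) =>
        if ((k : Int) == (cs.length : Int) - 1) then acc ++ [',']
        else acc ++ (PySem.List.pyGet? cs (k : Int)).toList) acc
    = acc ++ cs.take m := by
  induction m generalizing acc with
  | zero => simp
  | succ m ih =>
    rw [List.range_succ, List.foldl_append, ih (by omega)]
    have hne : ¬ (((m : Int)) == (cs.length : Int) - 1) := by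
      simp only [beq_iff_eq]; omega
    have hget : PySem.List.pyGet? cs (m : Int) = some cs[m] := by
      simp [PySem.List.pyGet?_natCast, List.getElem?_eq_getElem (by omega : m < cs.length)]
    simp only [List.foldl_cons, List.foldl_nil, if_neg hne, hget]
    rw [List.take_add_one, List.getElem?_eq_getElem (by omega : m < cs.length)]
    simp

-- A's whole loop, at list level: empty gives [], otherwise all-but-last ++ [','] (= B's slice)
lemma sac_list (cs : List Char) :
    (PySem.List.pyRange 0 (PySem.List.len cs) 1).foldl
      (fun (acc : List Char) i =>
        if i == PySem.List.len cs - 1 then acc ++ [',']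
        else acc ++ (PySem.List.pyGet? cs i).toList) []
    = if cs.isEmpty then [] else PySem.List.slice cs none (some (-1)) ++ [','] := by
  rcases h : cs with _ | ⟨c, rest⟩
  · simp [PySem.List.len]
  · have hlen : 0 < cs.length := by rw [h]; simp
    have hne : cs.isEmpty = false := by rw [h]; simp
    rw [← h, hne]
    simp only [PySem.List.len, PySem.List.pyRange_one, Int.sub_zero,
      Int.toNat_natCast, List.foldl_map, zero_add, Bool.false_eq_true, if_false]
    have hrange : List.range cs.length = List.range (cs.length - 1) ++ [cs.length - 1] := by
      conv_lhs => rw [show cs.length = (cs.length - 1) + 1 by omega]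
      exact List.range_succ
    rw [hrange, List.foldl_append]
    unfold PySem.List.len
    rw [sac_loop_copy cs (cs.length - 1) (by omega) []]
    have hlast : (((cs.length - 1 : Nat) : Int) == (cs.length : Int) - 1) = true := by
      simp only [beq_iff_eq]; omega
    simp only [List.foldl_cons, List.foldl_nil, hlast, if_true, List.nil_append]
    rw [PySem.List.slice_to_neg_one, List.dropLast_eq_take]

-- ===== VERDICT (by name: the statement is the Claim_ definition above) =====
theorem sacadorbarra_spec : Claim_equal_sacadorbarra := by
  intro cadena _
  simp only [Spec_sacadorbarra, sacadorbarra, sacadorbarra_alt, sac_list]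
  by_cases he : cadena.toList.isEmpty
  · simp only [he, if_true]
  · simp [he]
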